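-- pv_equiv track=rewrite | github.com/YUHANYU/Gigaword_V5_Process | process.py | has_indexes
-- ===== SOURCE A (Python) =====
-- def has_indexes(p):
--     indexes = [str(i) for i in range(100)]
--     index_num = 0
--     for i in indexes:
--         if i in p:
--             index_num += 1
--             if index_num >= 3:
--                 return True
--     return False
-- ===== SOURCE B (Python) =====
-- def has_indexes(p):
--     # One pass over p: collect the distinct numbers 0-99 that occur as substrings
--     # (each digit char; each adjacent digit pair with a non-zero leading digit).
--     found = set()
--     n = len(p)
--     for k in range(n):
--         c = p[k]
--         if c.isdigit():
--             found.add(c)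
--             if c != '0' and k + 1 < n and p[k + 1].isdigit():
--                 found.add(c + p[k + 1])
--     return len(found) >= 3
-- ===== Notes on version B (the rewrite author's own statement) =====
-- stated objective: alternative
-- what changed: Instead of testing each of the 100 fixed decimal patterns (0 through 99) for substring membership in p, B scans p once, collecting into a set every digit character and every adjacent digit pair with a non-zero leading digit, and returns whether the set has at least 3 elements.
import Mathlib
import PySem

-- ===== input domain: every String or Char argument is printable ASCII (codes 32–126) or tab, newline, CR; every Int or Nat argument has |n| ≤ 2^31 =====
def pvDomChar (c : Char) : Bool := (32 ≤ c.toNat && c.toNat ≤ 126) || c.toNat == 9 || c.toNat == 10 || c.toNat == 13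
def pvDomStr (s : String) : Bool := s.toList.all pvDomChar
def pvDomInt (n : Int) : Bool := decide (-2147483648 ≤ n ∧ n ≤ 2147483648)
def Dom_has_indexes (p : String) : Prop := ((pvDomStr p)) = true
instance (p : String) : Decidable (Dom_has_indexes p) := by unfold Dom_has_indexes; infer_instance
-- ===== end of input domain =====

-- B replaces A's 100 substring tests (each decimal number below 100 searched in p) by one left-to-right scan of p
-- collecting the distinct digit characters and non-zero-leading adjacent digit pairs into a set.

-- ===== PORT A =====
-- the loop 'for i in indexes: if i in p: index_num += 1; if index_num >= 3: return True'
def hasIndexesLoop (p : String) : List String → Nat → Bool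
  | [], _ => false
  | i :: rest, n =>
    if PySem.Str.isIn i p then
      if 3 ≤ n + 1 then true else hasIndexesLoop p rest (n + 1)
    else hasIndexesLoop p rest n

def has_indexes (p : String) : Bool :=
  hasIndexesLoop p ((PySem.List.pyRange 0 100 1).map PySem.Int.toStr) 0

-- ===== PORT B =====
-- Source B's index loop with one-character lookahead, as structural recursion on the character list;
-- 'c.isdigit()' on a one-character ASCII string is exactly PySem.Chars.isdigit of its character.
def scanDigits : List Char → PySem.Set String → PySem.Set String
  | [], found => found
  | c :: rest, found =>
    scanDigits rest
      (if PySem.Chars.isdigit c then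
        match rest with
        | d :: _ =>
          if c != '0' && PySem.Chars.isdigit d then
            (PySem.Set.add found (String.ofList [c])).add (String.ofList [c, d])
          else PySem.Set.add found (String.ofList [c])
        | [] => PySem.Set.add found (String.ofList [c])
      else found)

def has_indexes_alt (p : String) : Bool :=
  decide (3 ≤ (scanDigits p.toList PySem.Set.empty).length)

-- ===== PRECONDITION & SPEC =====
def Spec_has_indexes (p : String) (out : Bool) : Prop := out = has_indexes_alt p
instance (p : String) (out : Bool) : Decidable (Spec_has_indexes p out) := by unfold Spec_has_indexes; infer_instance

-- ===== CLAIM (what is proved, stated in full; the proofs are below) =====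
def Claim_equal_has_indexes : Prop := ∀ (p : String), Dom_has_indexes p → Spec_has_indexes p (has_indexes p)

-- ===== LEMMAS AND PROOFS =====

def allNums : List String := (PySem.List.pyRange 0 100 1).map PySem.Int.toStr

def digitChars : List Char := ['0', '1', '2', '3', '4', '5', '6', '7', '8', '9']

-- the shape of the strings A searches for: one digit, or two digits not starting with '0'
def numShape (x : String) : Bool :=
  match x.toList with
  | [c] => PySem.Chars.isdigit c
  | [a, b] => PySem.Chars.isdigit a && PySem.Chars.isdigit b && (a != '0')
  | _ => false

-- the strings B's scan can have collected after reading cs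
def FoundIn (cs : List Char) (x : String) : Prop :=
  (∃ c, x = String.ofList [c] ∧ PySem.Chars.isdigit c = true ∧ [c] <:+: cs) ∨
  (∃ a b, x = String.ofList [a, b] ∧ PySem.Chars.isdigit a = true ∧
    PySem.Chars.isdigit b = true ∧ a ≠ '0' ∧ [a, b] <:+: cs)

theorem char_eq_of_toNat {c d : Char} (h : c.toNat = d.toNat) : c = d :=
  Char.ext (UInt32.toNat_inj.mp h)

theorem isdigit_mem_digitChars (c : Char) (h : PySem.Chars.isdigit c = true) :
    c ∈ digitChars := by
  have hb : 48 ≤ c.toNat ∧ c.toNat ≤ 57 := by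
    simp [PySem.Chars.isdigit, Char.le_def] at h
    exact ⟨h.1, h.2⟩
  have h10 : c.toNat = 48 ∨ c.toNat = 49 ∨ c.toNat = 50 ∨ c.toNat = 51 ∨ c.toNat = 52 ∨
      c.toNat = 53 ∨ c.toNat = 54 ∨ c.toNat = 55 ∨ c.toNat = 56 ∨ c.toNat = 57 := by omega
  rcases h10 with h|h|h|h|h|h|h|h|h|h
  · rw [char_eq_of_toNat (d := '0') h]; decide
  · rw [char_eq_of_toNat (d := '1') h]; decide
  · rw [char_eq_of_toNat (d := '2') h]; decide
  · rw [char_eq_of_toNat (d := '3') h]; decide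
  · rw [char_eq_of_toNat (d := '4') h]; decide
  · rw [char_eq_of_toNat (d := '5') h]; decide
  · rw [char_eq_of_toNat (d := '6') h]; decide
  · rw [char_eq_of_toNat (d := '7') h]; decide
  · rw [char_eq_of_toNat (d := '8') h]; decide
  · rw [char_eq_of_toNat (d := '9') h]; decide

theorem allNums_shape : ∀ x ∈ allNums, numShape x = true := by decide

theorem single_mem : ∀ c ∈ digitChars, String.ofList [c] ∈ allNums := by
  intro c hc; fin_cases hc <;> decide

theorem pair_mem : ∀ a ∈ digitChars, ∀ b ∈ digitChars,
    a = '0' ∨ String.ofList [a, b] ∈ allNums := by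
  intro a ha b hb; fin_cases ha <;> fin_cases hb <;> first | (left; rfl) | (right; decide)

theorem mem_allNums_iff (x : String) : x ∈ allNums ↔ numShape x = true := by
  constructor
  · exact allNums_shape x
  · intro h
    unfold numShape at h
    split at h
    · next c heq =>
      rw [show x = String.ofList [c] by rw [← heq, String.ofList_toList]]
      exact single_mem c (isdigit_mem_digitChars c h)
    · next a b heq =>
      simp only [Bool.and_eq_true, bne_iff_ne] at h
      rw [show x = String.ofList [a, b] by rw [← heq, String.ofList_toList]]
      rcases pair_mem a (isdigit_mem_digitChars a h.1.1) b (isdigit_mem_digitChars b h.1.2)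
        with h0 | hm
      · exact absurd h0 h.2
      · exact hm
    · exact absurd h (by simp)

theorem single_prefix_iff (b : Char) (l : List Char) : [b] <+: l ↔ ∃ t, l = b :: t := by
  cases l with
  | nil => simp
  | cons d t => simp [List.cons_prefix_cons, eq_comm]

theorem single_infix_cons (a c : Char) (l : List Char) :
    [a] <:+: c :: l ↔ a = c ∨ [a] <:+: l := by
  rw [List.infix_cons_iff]
  simp [List.cons_prefix_cons]

theorem pair_infix_cons (a b c : Char) (l : List Char) :
    [a, b] <:+: c :: l ↔ (a = c ∧ [b] <+: l) ∨ [a, b] <:+: l := by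
  rw [List.infix_cons_iff]
  simp [List.cons_prefix_cons]

theorem FoundIn_nil (x : String) : ¬ FoundIn [] x := by
  rintro (⟨c, _, _, hin⟩ | ⟨a, b, _, _, _, _, hin⟩) <;> simp at hin

theorem FoundIn_cons (c : Char) (rest : List Char) (x : String) :
    FoundIn (c :: rest) x ↔
      (PySem.Chars.isdigit c = true ∧ x = String.ofList [c]) ∨
      (∃ d t, rest = d :: t ∧ PySem.Chars.isdigit c = true ∧ PySem.Chars.isdigit d = true ∧
        c ≠ '0' ∧ x = String.ofList [c, d]) ∨
      FoundIn rest x := by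
  simp only [FoundIn, single_infix_cons, pair_infix_cons, single_prefix_iff]
  constructor
  · rintro (⟨c', hx, hd, (rfl | hin)⟩ | ⟨a, b, hx, ha, hb, h0, (⟨rfl, t, rfl⟩ | hin)⟩)
    · exact .inl ⟨hd, hx⟩
    · exact .inr (.inr (.inl ⟨c', hx, hd, hin⟩))
    · exact .inr (.inl ⟨b, t, rfl, ha, hb, h0, hx⟩)
    · exact .inr (.inr (.inr ⟨a, b, hx, ha, hb, h0, hin⟩))
  · rintro (⟨hd, hx⟩ | ⟨d, t, rfl, hc, hd, h0, hx⟩ | (⟨c', hx, hd', hin⟩ | ⟨a, b, hx, ha, hb, h0, hin⟩))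
    · exact .inl ⟨c, hx, hd, .inl rfl⟩
    · exact .inr ⟨c, d, hx, hc, hd, h0, .inl ⟨rfl, t, rfl⟩⟩
    · exact .inl ⟨c', hx, hd', .inr hin⟩
    · exact .inr ⟨a, b, hx, ha, hb, h0, .inr hin⟩

theorem loopA_eq (p : String) (l : List String) (n : Nat) (hn : n < 3) :
    hasIndexesLoop p l n = decide (3 ≤ n + l.countP (fun i => PySem.Str.isIn i p)) := by
  induction l generalizing n with
  | nil =>
    simp only [hasIndexesLoop, List.countP_nil, Nat.add_zero]
    have h3 : ¬ (3 ≤ n) := by omega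
    simp [h3]
  | cons i rest ih =>
    rw [hasIndexesLoop]
    by_cases h : PySem.Str.isIn i p = true
    · rw [if_pos h]
      by_cases h3 : 3 ≤ n + 1
      · rw [if_pos h3]
        have hc : 3 ≤ n + List.countP (fun i => PySem.Str.isIn i p) (i :: rest) := by
          rw [List.countP_cons, if_pos h]; omega
        exact (decide_eq_true hc).symm
      · rw [if_neg h3, ih (n + 1) (by omega), List.countP_cons, if_pos h,
          decide_eq_decide]
        omega
    · rw [if_neg h, ih n hn, List.countP_cons, if_neg h]
      simp

theorem mem_scanDigits (cs : List Char) (s : PySem.Set String) (x : String) :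
    x ∈ scanDigits cs s ↔ x ∈ s ∨ FoundIn cs x := by
  induction cs generalizing s with
  | nil => simp [scanDigits, FoundIn_nil x]
  | cons c rest ih =>
    cases rest with
    | nil =>
      rw [scanDigits, ih, FoundIn_cons]
      by_cases hd : PySem.Chars.isdigit c = true
      · rw [if_pos hd, PySem.Set.mem_add]
        constructor
        · rintro ((hs | hx) | hf)
          · exact .inl hs
          · exact .inr (.inl ⟨hd, hx⟩)
          · exact absurd hf (FoundIn_nil x)
        · rintro (hs | (⟨_, hx⟩ | ⟨d, t, ht, _⟩ | hf))
          · exact .inl (.inl hs)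
          · exact .inl (.inr hx)
          · simp at ht
          · exact absurd hf (FoundIn_nil x)
      · rw [if_neg hd]
        constructor
        · rintro (hs | hf)
          · exact .inl hs
          · exact .inr (.inr (.inr hf))
        · rintro (hs | (⟨hdc, _⟩ | ⟨d', t', _, hdc, _⟩ | hf))
          · exact .inl hs
          · exact absurd hdc hd
          · exact absurd hdc hd
          · exact .inr hf
    | cons d t =>
      rw [scanDigits, ih, FoundIn_cons c (d :: t) x]
      by_cases hd : PySem.Chars.isdigit c = true
      · rw [if_pos hd]
        by_cases h2 : (c != '0' && PySem.Chars.isdigit d) = true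
        · have h2' := h2
          simp only [Bool.and_eq_true, bne_iff_ne] at h2'
          rw [if_pos h2, PySem.Set.mem_add, PySem.Set.mem_add]
          constructor
          · rintro (((hs | hx) | hx) | hf)
            · exact .inl hs
            · exact .inr (.inl ⟨hd, hx⟩)
            · exact .inr (.inr (.inl ⟨d, t, rfl, hd, h2'.2, h2'.1, hx⟩))
            · exact .inr (.inr (.inr hf))
          · rintro (hs | (⟨_, hx⟩ | ⟨d', t', ht, _, hd', h0', hx⟩ | hf))
            · exact .inl (.inl (.inl hs))
            · exact .inl (.inl (.inr hx))
            · injection ht with h1 _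
              subst h1
              exact .inl (.inr hx)
            · exact .inr hf
        · rw [if_neg h2, PySem.Set.mem_add]
          constructor
          · rintro ((hs | hx) | hf)
            · exact .inl hs
            · exact .inr (.inl ⟨hd, hx⟩)
            · exact .inr (.inr (.inr hf))
          · rintro (hs | (⟨_, hx⟩ | ⟨d', t', ht, _, hd', h0', hx⟩ | hf))
            · exact .inl (.inl hs)
            · exact .inl (.inr hx)
            · injection ht with h1 _
              subst h1
              exact absurd (show (c != '0' && PySem.Chars.isdigit d) = true by
                rw [Bool.and_eq_true, bne_iff_ne]; exact ⟨h0', hd'⟩) h2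
            · exact .inr hf
      · rw [if_neg hd]
        constructor
        · rintro (hs | hf)
          · exact .inl hs
          · exact .inr (.inr (.inr hf))
        · rintro (hs | (⟨hdc, _⟩ | ⟨d', t', _, hdc, _⟩ | hf))
          · exact .inl hs
          · exact absurd hdc hd
          · exact absurd hdc hd
          · exact .inr hf

theorem nodup_scanDigits (cs : List Char) (s : PySem.Set String) (hs : s.Nodup) :
    (scanDigits cs s).Nodup := by
  induction cs generalizing s with
  | nil => simpa [scanDigits] using hs
  | cons c rest ih =>
    cases rest with
    | nil =>
      rw [scanDigits]
      apply ih
      by_cases hd : PySem.Chars.isdigit c = true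
      · rw [if_pos hd]
        exact PySem.Set.nodup_add _ _ hs
      · rw [if_neg hd]
        exact hs
    | cons d t =>
      rw [scanDigits]
      apply ih
      by_cases hd : PySem.Chars.isdigit c = true
      · rw [if_pos hd]
        by_cases h2 : (c != '0' && PySem.Chars.isdigit d) = true
        · rw [if_pos h2]
          exact PySem.Set.nodup_add _ _ (PySem.Set.nodup_add _ _ hs)
        · rw [if_neg h2]
          exact PySem.Set.nodup_add _ _ hs
      · rw [if_neg hd]
        exact hs

theorem FoundIn_iff (cs : List Char) (x : String) :
    FoundIn cs x ↔ numShape x = true ∧ x.toList <:+: cs := by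
  constructor
  · rintro (⟨c, rfl, hd, hin⟩ | ⟨a, b, rfl, ha, hb, h0, hin⟩)
    · exact ⟨by simp [numShape, String.toList_ofList, hd], by simpa using hin⟩
    · exact ⟨by simp [numShape, String.toList_ofList, ha, hb, h0], by simpa using hin⟩
  · rintro ⟨hs, hin⟩
    unfold numShape at hs
    split at hs
    · next c heq =>
      exact .inl ⟨c, by rw [← heq, String.ofList_toList], hs, heq ▸ hin⟩
    · next a b heq =>
      simp only [Bool.and_eq_true, bne_iff_ne] at hs
      exact .inr ⟨a, b, by rw [← heq, String.ofList_toList], hs.1.1, hs.1.2, hs.2, heq ▸ hin⟩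
    · exact absurd hs (by simp)

theorem nodup_allNums : allNums.Nodup := by decide

-- ===== VERDICT (by name: the statement is the Claim_ definition above) =====
theorem has_indexes_spec : Claim_equal_has_indexes := by
  intro p _
  unfold Spec_has_indexes has_indexes has_indexes_alt
  rw [loopA_eq p _ 0 (by omega)]
  have hempty : (PySem.Set.empty : PySem.Set String).Nodup := by
    simp [PySem.Set.empty]
  have hperm : (allNums.filter (fun i => PySem.Str.isIn i p)).Perm
      (scanDigits p.toList PySem.Set.empty) := by
    rw [List.perm_ext_iff_of_nodup (nodup_allNums.filter _) (nodup_scanDigits _ _ hempty)]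
    intro x
    rw [List.mem_filter, mem_scanDigits, FoundIn_iff, mem_allNums_iff,
      PySem.Str.isIn_iff_infix]
    simp [PySem.Set.empty]
  have hl : (allNums.countP (fun i => PySem.Str.isIn i p))
      = (scanDigits p.toList PySem.Set.empty).length := by
    rw [List.countP_eq_length_filter]; exact hperm.length_eq
  show decide (3 ≤ 0 + allNums.countP (fun i => PySem.Str.isIn i p)) = _
  rw [hl]
  simp
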